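-- pv_equiv track=rewrite | github.com/Maxiglo/CompetitiveProgramming | Codeforces/B_Odd_Swap_Sort.py | solve
-- ===== SOURCE A (Python) =====
-- def solve(l):
--     if len(l) == 1:
--         return True
--     pairs = -1
--     impairs = -1
--
--     for elem in l:
--         if elem%2==0:
--             if elem < pairs:
--                 return False
--             else:
--                 pairs = elem
--         else:
--             if elem < impairs:
--                 return False
--             else:
--                 impairs = elem
--     return True
-- ===== SOURCE B (Python) =====
-- def solve(l):
--     evens = [x for x in l if x % 2 == 0]
--     odds = [x for x in l if x % 2]
--     return evens == sorted(evens) and odds == sorted(odds)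
-- ===== Notes on version B (the rewrite author's own statement) =====
-- stated objective: simpler
-- what changed: Instead of one pass tracking running last-even/last-odd seeds initialised to -1, B partitions the list into the even and odd subsequences and checks each against its sorted copy; the len==1 guard disappears.
-- intended difference: On lists of length != 1 whose even and odd subsequences are each non-decreasing but whose first even or first odd element is < -1, A returns False (its -1 sentinel wrongly rejects negative leading elements) while B returns True, which is the intended answer since the parity-restricted sort is possible. — e.g. on solve([-4, -2]): A returns false, B returns true
import Mathlib
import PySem

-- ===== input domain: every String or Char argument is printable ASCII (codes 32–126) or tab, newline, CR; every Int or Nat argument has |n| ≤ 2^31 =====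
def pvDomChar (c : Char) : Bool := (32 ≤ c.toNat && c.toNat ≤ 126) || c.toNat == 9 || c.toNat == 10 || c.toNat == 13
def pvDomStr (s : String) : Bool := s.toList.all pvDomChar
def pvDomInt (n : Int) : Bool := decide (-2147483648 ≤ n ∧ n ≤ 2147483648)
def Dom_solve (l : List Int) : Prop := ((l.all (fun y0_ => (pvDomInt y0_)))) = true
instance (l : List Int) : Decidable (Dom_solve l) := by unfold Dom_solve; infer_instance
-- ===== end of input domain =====

-- B checks sortedness of the even and odd subsequences directly; A's -1 sentinels make A
-- wrongly reject some lists with leading elements < -1 (see D_solve below).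

-- ===== PORT A =====
def solveLoop : List Int → Int → Int → Bool
  | [], _, _ => true
  | e :: rest, pairs, impairs =>
    if PySem.Int.mod e 2 == 0 then
      if e < pairs then false else solveLoop rest e impairs
    else
      if e < impairs then false else solveLoop rest pairs e

def solve (l : List Int) : Bool :=
  if l.length == 1 then true
  else solveLoop l (-1) (-1)

-- ===== PORT B =====
def solve_alt (l : List Int) : Bool :=
  let evens := l.filter (fun x => PySem.Int.mod x 2 == 0)
  let odds := l.filter (fun x => PySem.Int.mod x 2 != 0)
  (evens == PySem.List.sorted evens (fun x => x) false) &&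
  (odds == PySem.List.sorted odds (fun x => x) false)

-- ===== PRECONDITION & SPEC =====
-- On lists of length ≠ 1 whose even and odd subsequences are each non-decreasing but whose
-- first even or first odd element is < -1, A returns False (its -1 sentinel wrongly rejects
-- negative leading elements) while B returns True, the intended answer.
def D_solve (l : List Int) : Prop :=
  l.length ≠ 1 ∧
  List.IsChain (· ≤ ·) (l.filter (fun x => x % 2 == 0)) ∧
  List.IsChain (· ≤ ·) (l.filter (fun x => x % 2 != 0)) ∧
  ((∃ x, (l.filter (fun x => x % 2 == 0)).head? = some x ∧ x < -1) ∨
   (∃ x, (l.filter (fun x => x % 2 != 0)).head? = some x ∧ x < -1))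
instance (l : List Int) : Decidable (D_solve l) := by unfold D_solve; infer_instance

def Spec_solve (l : List Int) (out : Bool) : Prop := ¬ D_solve l → out = solve_alt l
instance (l : List Int) (out : Bool) : Decidable (Spec_solve l out) := by unfold Spec_solve; infer_instance

def pvDiffWitness_solve : List Int := [-4, -2]
def pvDiffWitnessOut_solve : Bool × Bool := (false, true)

-- ===== CLAIM (what is proved, stated in full; the proofs are below) =====
def Claim_unchanged_solve : Prop := ∀ (l : List Int), Dom_solve l → Spec_solve l (solve l)
def Claim_changed_solve : Prop := Dom_solve (pvDiffWitness_solve) ∧ D_solve (pvDiffWitness_solve) ∧ solve (pvDiffWitness_solve) = pvDiffWitnessOut_solve.1 ∧ solve_alt (pvDiffWitness_solve) = pvDiffWitnessOut_solve.2 ∧ pvDiffWitnessOut_solve.1 ≠ pvDiffWitnessOut_solve.2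
def Claim_exact_solve : Prop := ∀ (l : List Int), Dom_solve l → D_solve l → solve l ≠ solve_alt l

-- ===== LEMMAS AND PROOFS =====

-- PySem.Int.mod with positive divisor is Lean's emod
lemma mod2_eq (x : Int) : PySem.Int.mod x 2 = x % 2 :=
  PySem.Int.mod_eq_emod_of_pos (by norm_num)

-- A's loop computes: chain condition on (p :: evens) and (i :: odds)
lemma solveLoop_eq (l : List Int) : ∀ p i : Int,
    solveLoop l p i =
      (decide (List.IsChain (· ≤ ·) (p :: l.filter (fun x => x % 2 == 0))) &&
       decide (List.IsChain (· ≤ ·) (i :: l.filter (fun x => x % 2 != 0)))) := by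
  induction l with
  | nil => intro p i; simp [solveLoop]
  | cons e rest ih =>
    intro p i
    by_cases he : e % 2 = 0
    · have : PySem.Int.mod e 2 == 0 := by simp [he]
      simp only [solveLoop, this]
      rw [List.filter_cons, List.filter_cons]
      simp only [he]
      by_cases hlt : e < p
      · simp [hlt, List.isChain_cons_cons, show ¬ p ≤ e by omega]
      · simp only [if_neg hlt]
        rw [ih e i]
        simp [List.isChain_cons_cons, show p ≤ e by omega]
    · have h1 : (PySem.Int.mod e 2 == 0) = false := by simp [he]
      simp only [solveLoop, h1, Bool.false_eq_true, if_false]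
      rw [List.filter_cons, List.filter_cons]
      simp only [show (e % 2 == 0) = false by simp [he], show (e % 2 != 0) = true by simp [he]]
      by_cases hlt : e < i
      · simp [hlt, List.isChain_cons_cons, show ¬ i ≤ e by omega]
      · simp only [if_neg hlt]
        rw [ih p e]
        simp [List.isChain_cons_cons, show i ≤ e by omega]

-- B computes: chain condition on evens and odds
lemma self_eq_sorted_iff (xs : List Int) :
    (xs == PySem.List.sorted xs (fun x => x) false) = decide (List.IsChain (· ≤ ·) xs) := by
  by_cases h : List.IsChain (· ≤ ·) xs
  · have hp : xs.Pairwise (fun a b : Int => a ≤ b) := (List.isChain_iff_pairwise).1 h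
    rw [PySem.List.sorted_eq_self_of_pairwise xs (fun x => x) hp]
    simp [h]
  · simp only [decide_eq_false h]
    rw [beq_eq_false_iff_ne]
    intro heq
    exact h ((List.isChain_iff_pairwise).2 (by
      have := PySem.List.sorted_pairwise xs (fun x => x)
      rw [← heq] at this
      exact this))

lemma solve_alt_eq (l : List Int) :
    solve_alt l =
      (decide (List.IsChain (· ≤ ·) (l.filter (fun x => x % 2 == 0))) &&
       decide (List.IsChain (· ≤ ·) (l.filter (fun x => x % 2 != 0)))) := by
  unfold solve_alt
  simp only [mod2_eq, self_eq_sorted_iff]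

-- chain with sentinel -1 prepended, given the head is ≥ -1
lemma chain_sentinel (xs : List Int) (h : ∀ x, xs.head? = some x → ¬ x < -1) :
    List.IsChain (· ≤ ·) ((-1 : Int) :: xs) ↔ List.IsChain (· ≤ ·) xs := by
  cases xs with
  | nil => simp
  | cons a t =>
    have : (-1 : Int) ≤ a := by have := h a rfl; omega
    simp [List.isChain_cons_cons, this]

lemma singleton_alt (x : Int) : solve_alt [x] = true := by
  rw [solve_alt_eq]
  by_cases h : x % 2 = 0 <;> simp [h]

-- ===== VERDICT (by name: the statement is the Claim_ definition above) =====
theorem solve_spec : Claim_unchanged_solve := by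
  intro l _ hnD
  unfold solve
  by_cases h1 : l.length = 1
  · match l, h1 with
    | [x], _ => simp [singleton_alt]
  · rw [if_neg (show ¬((l.length == 1) = true) by simpa using h1)]
    rw [solveLoop_eq, solve_alt_eq]
    by_cases hce : List.IsChain (· ≤ ·) (l.filter (fun x => x % 2 == 0))
    · by_cases hco : List.IsChain (· ≤ ·) (l.filter (fun x => x % 2 != 0))
      · -- both sorted; since ¬D, both heads ≥ -1
        have hhe : ∀ x, (l.filter (fun x => x % 2 == 0)).head? = some x → ¬ x < -1 := by
          intro x hx hlt
          exact hnD ⟨h1, hce, hco, Or.inl ⟨x, hx, hlt⟩⟩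
        have hho : ∀ x, (l.filter (fun x => x % 2 != 0)).head? = some x → ¬ x < -1 := by
          intro x hx hlt
          exact hnD ⟨h1, hce, hco, Or.inr ⟨x, hx, hlt⟩⟩
        rw [decide_eq_true ((chain_sentinel _ hhe).2 hce),
            decide_eq_true ((chain_sentinel _ hho).2 hco),
            decide_eq_true hce, decide_eq_true hco]
      · have : ¬ List.IsChain (· ≤ ·) ((-1 : Int) :: l.filter (fun x => x % 2 != 0)) := by
          intro h; exact hco (List.IsChain.tail h)
        simp [this, hco]
    · have : ¬ List.IsChain (· ≤ ·) ((-1 : Int) :: l.filter (fun x => x % 2 == 0)) := by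
        intro h; exact hce (List.IsChain.tail h)
      simp [this, hce]

theorem solve_changed : Claim_changed_solve := by unfold Claim_changed_solve; decide

theorem solve_tight : Claim_exact_solve := by
  intro l _ hD
  obtain ⟨h1, hce, hco, hhd⟩ := hD
  have hBtrue : solve_alt l = true := by
    rw [solve_alt_eq, decide_eq_true hce, decide_eq_true hco]; rfl
  have hAfalse : solve l = false := by
    unfold solve
    rw [if_neg (show ¬((l.length == 1) = true) by simpa using h1)]
    rw [solveLoop_eq]
    rcases hhd with ⟨x, hx, hlt⟩ | ⟨x, hx, hlt⟩
    · have : ¬ List.IsChain (· ≤ ·) ((-1 : Int) :: l.filter (fun x => x % 2 == 0)) := by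
        cases hfe : l.filter (fun x => x % 2 == 0) with
        | nil => rw [hfe] at hx; simp at hx
        | cons a t =>
          rw [hfe] at hx; simp at hx; subst hx
          simp [List.isChain_cons_cons]; intro h; omega
      simp [this]
    · have : ¬ List.IsChain (· ≤ ·) ((-1 : Int) :: l.filter (fun x => x % 2 != 0)) := by
        cases hfo : l.filter (fun x => x % 2 != 0) with
        | nil => rw [hfo] at hx; simp at hx
        | cons a t =>
          rw [hfo] at hx; simp at hx; subst hx
          simp [List.isChain_cons_cons]; intro h; omega
      simp [this]
  rw [hBtrue, hAfalse]; simp
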